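-- pv_equiv track=rewrite | github.com/eduardo239/card-game-battle-2 | src/util/test.py | missingCharacters
-- ===== SOURCE A (Python) =====
-- def missingCharacters(s):
--     missing = []
--     for i in range(len(s)):
--         if s[i] == ' ':
--             continue
--         if s[i] not in s[i+1:]:
--             missing.append(s[i])
--     return ''.join(missing)
-- ===== SOURCE B (Python) =====
-- def missingCharacters(s):
--     # single right-to-left pass: first time a char is seen from the right
--     # is its last occurrence in the original order
--     seen = set()
--     result = []
--     for ch in reversed(s):
--         if ch != ' ' and ch not in seen:
--             seen.add(ch)
--             result.append(ch)
--     return ''.join(reversed(result))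
-- ===== Notes on version B (the rewrite author's own statement) =====
-- stated objective: faster
-- what changed: Replaces the nested O(n^2) suffix-membership scan (s[i] not in s[i+1:]) with a single right-to-left pass keeping a seen-set, reversing the collected chars at the end.
import Mathlib
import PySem

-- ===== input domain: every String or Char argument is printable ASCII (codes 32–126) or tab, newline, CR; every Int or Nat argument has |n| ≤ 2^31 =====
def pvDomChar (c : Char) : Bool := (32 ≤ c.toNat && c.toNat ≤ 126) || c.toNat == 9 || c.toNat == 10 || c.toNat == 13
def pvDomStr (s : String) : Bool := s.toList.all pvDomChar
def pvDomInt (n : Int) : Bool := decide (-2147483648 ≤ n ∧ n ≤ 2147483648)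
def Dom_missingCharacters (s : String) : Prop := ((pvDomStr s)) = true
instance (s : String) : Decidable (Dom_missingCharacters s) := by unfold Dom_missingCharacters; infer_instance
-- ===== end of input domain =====

-- B replaces A's nested suffix-membership scan by a single reversed pass with a seen-set (objective: faster).

-- ===== PORT A =====
-- 's[i] not in s[i+1:]' on a single character equals char membership in the suffix, ported as .contains on the slice.
def missingCharacters (s : String) : String :=
  let l := s.toList
  let missing := (PySem.List.pyRange 0 (l.length : Int) 1).foldl (fun acc i =>
    let c := PySem.List.pyGetD l i ' '  -- i ∈ range(len(s)) is always in range, so the default is never used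
    if c = ' ' then acc
    else if (PySem.List.slice l (some (i + 1)) none).contains c then acc
    else acc ++ [c]) []
  String.ofList missing

-- ===== PORT B =====
def missingCharacters_alt (s : String) : String :=
  let st := s.toList.reverse.foldl (fun (st : PySem.Set Char × List Char) ch =>
    if ch ≠ ' ' ∧ ¬ (PySem.Set.contains st.1 ch) then (PySem.Set.add st.1 ch, st.2 ++ [ch]) else st)
    (PySem.Set.empty, [])
  String.ofList st.2.reverse

-- ===== PRECONDITION & SPEC =====
def Spec_missingCharacters (s : String) (out : String) : Prop := out = missingCharacters_alt s
instance (s : String) (out : String) : Decidable (Spec_missingCharacters s out) := by unfold Spec_missingCharacters; infer_instance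

-- ===== CLAIM (what is proved, stated in full; the proofs are below) =====
def Claim_equal_missingCharacters : Prop := ∀ (s : String), Dom_missingCharacters s → Spec_missingCharacters s (missingCharacters s)

-- ===== LEMMAS AND PROOFS =====

-- characterisation of A's output: last occurrences of non-space chars, in order
def lastOccs : List Char → List Char
  | [] => []
  | c :: t => (if c ≠ ' ' ∧ c ∉ t then [c] else []) ++ lastOccs t

theorem mem_lastOccs (c : Char) (l : List Char) : c ∈ lastOccs l ↔ c ∈ l ∧ c ≠ ' ' := by
  induction l with
  | nil => simp [lastOccs]
  | cons a t ih =>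
    simp only [lastOccs, List.mem_append, List.mem_cons]
    by_cases ha : a ≠ ' ' ∧ a ∉ t
    · rw [if_pos ha]
      constructor
      · rintro (h | h)
        · simp only [List.mem_singleton] at h
          exact ⟨Or.inl h, h ▸ ha.1⟩
        · exact ⟨Or.inr (ih.mp h).1, (ih.mp h).2⟩
      · rintro ⟨(rfl | h1), h2⟩
        · exact Or.inl (List.mem_singleton.mpr rfl)
        · exact Or.inr (ih.mpr ⟨h1, h2⟩)
    · rw [if_neg ha]
      simp only [List.not_mem_nil, false_or]
      constructor
      · intro h; exact ⟨Or.inr (ih.mp h).1, (ih.mp h).2⟩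
      · rintro ⟨(rfl | h1), h2⟩
        · push_neg at ha
          exact ih.mpr ⟨ha h2, h2⟩
        · exact ih.mpr ⟨h1, h2⟩

-- A's loop step, with the two ifs folded into one append
theorem stepA_eq (acc : List Char) (c : Char) (suf : List Char) :
    (if c = ' ' then acc else if suf.contains c then acc else acc ++ [c])
      = acc ++ (if c ≠ ' ' ∧ c ∉ suf then [c] else []) := by
  by_cases h1 : c = ' '
  · simp [h1]
  · by_cases h2 : c ∈ suf <;> simp [h1, h2]

-- A's fold over range(k, len l) computes lastOccs (l.drop k)
theorem foldA_eq (l : List Char) : ∀ (k : Nat) (acc : List Char),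
    (PySem.List.pyRange (k : Int) (l.length : Int) 1).foldl (fun acc i =>
      let c := PySem.List.pyGetD l i ' '
      if c = ' ' then acc
      else if (PySem.List.slice l (some (i + 1)) none).contains c then acc
      else acc ++ [c]) acc = acc ++ lastOccs (l.drop k) := by
  intro k
  induction hn : l.length - k generalizing k with
  | zero =>
    intro acc
    have hk : l.length ≤ k := by omega
    rw [PySem.List.pyRange_one_eq_nil (by exact_mod_cast hk)]
    simp [List.drop_eq_nil_of_le hk, lastOccs]
  | succ n ih =>
    intro acc
    have hk : k < l.length := by omega
    rw [PySem.List.pyRange_one_cons (by exact_mod_cast hk)]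
    simp only [List.foldl_cons]
    have hget : PySem.List.pyGetD l (k : Int) ' ' = l[k] := by
      rw [PySem.List.pyGetD_natCast]
      simp [List.getD, hk]
    have hslice : PySem.List.slice l (some ((k : Int) + 1)) none = l.drop (k + 1) := by
      have h : ((k : Int) + 1) = ((k + 1 : Nat) : Int) := by push_cast; ring
      rw [h, PySem.List.slice_from_natCast]
    have hdrop : l.drop k = l[k] :: l.drop (k + 1) := List.drop_eq_getElem_cons hk
    simp only [hget, hslice]
    rw [stepA_eq]
    have hcast : (k : Int) + 1 = ((k + 1 : Nat) : Int) := by push_cast; ring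
    rw [hcast, ih (k + 1) (by omega)]
    rw [hdrop]
    simp [lastOccs]

-- B's loop with the seen-set replaced by membership in the result (they coincide)
def goB (r : List Char) (res : List Char) : List Char :=
  r.foldl (fun res c => if c ≠ ' ' ∧ c ∉ res then res ++ [c] else res) res

theorem foldB_eq (r : List Char) : ∀ (res : List Char),
    r.foldl (fun (st : PySem.Set Char × List Char) ch =>
      if ch ≠ ' ' ∧ ¬ (PySem.Set.contains st.1 ch) then (PySem.Set.add st.1 ch, st.2 ++ [ch]) else st)
      (res, res) = (goB r res, goB r res) := by
  induction r with
  | nil => intro res; simp [goB]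
  | cons c t ih =>
    intro res
    have hstep : (if c ≠ ' ' ∧ ¬ (PySem.Set.contains res c) then
          (PySem.Set.add res c, res ++ [c]) else ((res, res) : PySem.Set Char × List Char))
        = (if c ≠ ' ' ∧ c ∉ res then res ++ [c] else res,
           if c ≠ ' ' ∧ c ∉ res then res ++ [c] else res) := by
      by_cases h1 : c = ' '
      · simp [h1]
      · by_cases hm : c ∈ res
        · simp [PySem.Set.contains, h1, hm]
        · simp [PySem.Set.contains, PySem.Set.add, h1, hm]
    simp only [List.foldl_cons, hstep, ih, goB]

theorem goB_append (xs : List Char) (c : Char) (res : List Char) :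
    goB (xs ++ [c]) res =
      (if c ≠ ' ' ∧ c ∉ goB xs res then goB xs res ++ [c] else goB xs res) := by
  simp [goB, List.foldl_append]

-- the crux: processing the reverse left-to-right yields the reverse of lastOccs
theorem goB_reverse (l : List Char) : goB l.reverse [] = (lastOccs l).reverse := by
  induction l with
  | nil => simp [goB, lastOccs]
  | cons c t ih =>
    simp only [List.reverse_cons]
    rw [goB_append, ih]
    simp only [lastOccs, List.reverse_append]
    by_cases h1 : c = ' '
    · rw [if_neg (by simp [h1]), if_neg (by simp [h1])]
      simp
    · by_cases h2 : c ∈ t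
      · rw [if_neg (by simp [List.mem_reverse, mem_lastOccs, h1, h2]),
            if_neg (by simp [h1, h2])]
        simp
      · rw [if_pos ⟨h1, by simp [List.mem_reverse, mem_lastOccs, h1, h2]⟩,
            if_pos ⟨h1, h2⟩]
        simp

-- ===== VERDICT (by name: the statement is the Claim_ definition above) =====
theorem missingCharacters_spec : Claim_equal_missingCharacters := by
  intro s _
  unfold Spec_missingCharacters missingCharacters missingCharacters_alt
  have hA := foldA_eq s.toList 0 []
  simp only [Nat.cast_zero] at hA
  simp only [hA, List.drop_zero, List.nil_append]
  have hB := foldB_eq s.toList.reverse []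
  simp only [PySem.Set.empty] at hB ⊢
  rw [hB]
  rw [goB_reverse, List.reverse_reverse]
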